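-- pv_equiv track=rewrite | github.com/buetcse17/Rokomari | product_details/views.py | slice_name
-- ===== SOURCE A (Python) =====
-- def slice_name(str):
--     ret = ""
--     for i in range(len(str)):
--         if len(ret) >= 42:
--             ret += "..."
--             break
--         if str[i] == ':' or str[i] == '(':
--             break
--         ret += str[i]
--     return ret
-- ===== SOURCE B (Python) =====
-- def slice_name(str):
--     head = str[:42]
--     ia = head.find(':')
--     ib = head.find('(')
--     cuts = [i for i in (ia, ib) if i != -1]
--     if cuts:
--         return head[:min(cuts)]
--     return head + "..." if len(str) > 42 else str
-- ===== Notes on version B (the rewrite author's own statement) =====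
-- stated objective: simpler
-- what changed: Replaces the char-by-char accumulator loop with two interleaved break conditions by a find-then-slice decomposition: take the first 42 chars, cut at the earliest ':'/'(' found there, otherwise append '...' iff the string is longer than 42.
import Mathlib
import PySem

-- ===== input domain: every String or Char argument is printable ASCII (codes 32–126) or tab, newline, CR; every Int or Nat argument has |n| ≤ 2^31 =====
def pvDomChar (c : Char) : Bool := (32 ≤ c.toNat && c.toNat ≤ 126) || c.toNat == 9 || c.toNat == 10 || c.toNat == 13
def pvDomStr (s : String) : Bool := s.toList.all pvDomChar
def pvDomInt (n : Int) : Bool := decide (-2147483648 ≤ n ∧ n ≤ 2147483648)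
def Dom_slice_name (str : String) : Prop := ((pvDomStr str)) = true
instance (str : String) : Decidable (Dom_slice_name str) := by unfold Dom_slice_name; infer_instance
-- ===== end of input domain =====

-- Header: B replaces A's char-by-char accumulator loop by find-then-slice (objective: simpler).
-- ===== PORT A =====
-- loop over the characters with accumulator ret; 'break' modelled by returning
def sliceNameGo (ret : List Char) : List Char → List Char
  | [] => ret
  | c :: rest =>
    if ret.length ≥ 42 then ret ++ "...".toList
    else if c = ':' ∨ c = '(' then ret
    else sliceNameGo (ret ++ [c]) rest

def slice_name (str : String) : String :=
  String.ofList (sliceNameGo [] str.toList)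

-- ===== PORT B =====
def slice_name_alt (str : String) : String :=
  let l := str.toList
  let head := l.take 42
  let ia := head.idxOf? ':'
  let ib := head.idxOf? '('
  match ia, ib with
  | some i, some j => String.ofList (head.take (min i j))
  | some i, none => String.ofList (head.take i)
  | none, some j => String.ofList (head.take j)
  | none, none => if l.length > 42 then String.ofList (head ++ "...".toList) else str

-- ===== PRECONDITION & SPEC =====
def Spec_slice_name (str : String) (out : String) : Prop := out = slice_name_alt str
instance (str : String) (out : String) : Decidable (Spec_slice_name str out) := by unfold Spec_slice_name; infer_instance

-- ===== CLAIM (what is proved, stated in full; the proofs are below) =====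
def Claim_equal_slice_name : Prop := ∀ (str : String), Dom_slice_name str → Spec_slice_name str (slice_name str)

-- ===== LEMMAS AND PROOFS =====

-- characterisation of A's loop: with k chars already accumulated, it cuts the remaining
-- input at the first ':'/'(' within the next 42-k chars, else appends "..." iff input remains
theorem sliceNameGo_spec (l : List Char) : ∀ (ret : List Char), ret.length ≤ 42 →
    sliceNameGo ret l =
      (match (l.take (42 - ret.length)).findIdx? (fun c => c == ':' || c == '(') with
       | some i => ret ++ (l.take (42 - ret.length)).take i
       | none =>
          if 42 - ret.length < l.length then ret ++ l.take (42 - ret.length) ++ "...".toList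
          else ret ++ l) := by
  induction l with
  | nil => intro ret _; simp [sliceNameGo]
  | cons c rest ih =>
    intro ret hle
    by_cases h42 : ret.length ≥ 42
    · have h : ret.length = 42 := le_antisymm hle h42
      simp [sliceNameGo, h]
    · have hm : 42 - ret.length = (42 - (ret.length + 1)) + 1 := by omega
      by_cases hc : (c == ':' || c == '(') = true
      · have hc' : c = ':' ∨ c = '(' := by
          rcases Bool.or_eq_true_iff.mp hc with h | h
          · exact Or.inl (by exact beq_iff_eq.mp h)
          · exact Or.inr (by exact beq_iff_eq.mp h)
        simp [sliceNameGo, h42, hc', hm, List.findIdx?_cons, hc]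
      · have hc' : ¬ (c = ':' ∨ c = '(') := by
          rintro (h | h) <;> simp [h] at hc
        have hlen : (ret ++ [c]).length ≤ 42 := by simp; omega
        have := ih (ret ++ [c]) hlen
        rw [show sliceNameGo ret (c :: rest) = sliceNameGo (ret ++ [c]) rest by
              simp [sliceNameGo, h42, hc'], this]
        have hm2 : 42 - (ret ++ [c]).length = 42 - (ret.length + 1) := by simp
        rw [hm2, hm]
        simp only [List.take_succ_cons, List.findIdx?_cons, hc, Bool.false_eq_true, if_false]
        cases hfi : (rest.take (42 - (ret.length + 1))).findIdx? (fun c => c == ':' || c == '(') with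
        | some i => simp
        | none =>
          simp only [List.length_cons]
          have hiff : (42 - (ret.length + 1) < rest.length) ↔ (42 - (ret.length + 1) + 1 < rest.length + 1) := by omega
          split_ifs with h1 h2 h2 <;> simp_all <;> omega

-- the min of the two finds is the first index of either character
theorem idxOf?_pair_eq_findIdx? (h : List Char) :
    (match h.idxOf? ':', h.idxOf? '(' with
     | some i, some j => some (min i j)
     | some i, none => some i
     | none, some j => some j
     | none, none => (none : Option Nat)) =
      h.findIdx? (fun c => c == ':' || c == '(') := by
  induction h with
  | nil => simp [List.idxOf?]
  | cons c t ih =>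
    by_cases h1 : c = ':'
    · subst h1
      simp only [List.idxOf?, List.findIdx?_cons, beq_self_eq_true, if_true,
        show (':' == '(') = false by decide, Bool.false_eq_true, if_false, Bool.true_or]
      cases List.findIdx? (fun x => x == '(') t <;> simp
    · by_cases h2 : c = '('
      · subst h2
        simp only [List.idxOf?, List.findIdx?_cons, beq_self_eq_true, if_true,
          show ('(' == ':') = false by decide, Bool.false_eq_true, if_false, Bool.or_true]
        cases List.findIdx? (fun x => x == ':') t <;> simp
      · have b1 : (c == ':') = false := beq_eq_false_iff_ne.mpr h1
        have b2 : (c == '(') = false := beq_eq_false_iff_ne.mpr h2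
        simp only [List.idxOf?, List.findIdx?_cons, b1, b2, Bool.false_eq_true, if_false,
          Bool.or_self] at *
        rw [← ih]
        cases List.findIdx? (fun x => x == ':') t <;>
          cases List.findIdx? (fun x => x == '(') t <;> simp

-- ===== VERDICT (by name: the statement is the Claim_ definition above) =====
theorem slice_name_spec : Claim_equal_slice_name := by
  intro str _
  unfold Spec_slice_name slice_name slice_name_alt
  have h := sliceNameGo_spec str.toList [] (by simp)
  simp only [List.length_nil, Nat.sub_zero, List.nil_append] at h
  rw [h, ← idxOf?_pair_eq_findIdx? (str.toList.take 42)]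
  cases h1 : (str.toList.take 42).idxOf? ':' <;> cases h2 : (str.toList.take 42).idxOf? '(' <;>
    simp only [h1, h2]
  split_ifs with hgt
  · rfl
  · exact String.ofList_toList
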